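-- pv_equiv track=rewrite | github.com/namhyeonh0/Algorithm | 프로그래머스/2/17677. ［1차］ 뉴스 클러스터링/［1차］ 뉴스 클러스터링.py | ML
-- ===== SOURCE A (Python) =====
-- def ML(list1, list2):
--     while len(list1) != 0:
--         ss = list1[0]
--         a = list1.count(ss)
--         b = list2.count(ss)
--         if ss in list2:
--             if a-b <= 0:
--                 for i in range(a):
--                     list1.remove(ss)
--             else:
--                 for i in range(a-b):
--                     list2.append(ss)
--                 for i in range(a):
--                     list1.remove(ss)
--         else:
--             for i in range(a):
--                 list2.append(ss)
--                 list1.remove(ss)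
--     return list2
-- ===== SOURCE B (Python) =====
-- def ML(list1, list2):
--     c1 = {}
--     for x in list1:
--         c1[x] = c1.get(x, 0) + 1
--     c2 = {}
--     for x in list2:
--         c2[x] = c2.get(x, 0) + 1
--     out = list(list2)
--     for x, n in c1.items():
--         out += [x] * max(0, n - c2.get(x, 0))
--     return out
-- ===== Notes on version B (the rewrite author's own statement) =====
-- stated objective: faster
-- what changed: A repeatedly scans, removes from and appends to the lists (count/remove/in inside a while loop, quadratic); B builds one counting dict per list in a single pass each and then appends max(0, c1-c2) copies per distinct element of list1 in first-appearance order.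
import Mathlib
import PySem

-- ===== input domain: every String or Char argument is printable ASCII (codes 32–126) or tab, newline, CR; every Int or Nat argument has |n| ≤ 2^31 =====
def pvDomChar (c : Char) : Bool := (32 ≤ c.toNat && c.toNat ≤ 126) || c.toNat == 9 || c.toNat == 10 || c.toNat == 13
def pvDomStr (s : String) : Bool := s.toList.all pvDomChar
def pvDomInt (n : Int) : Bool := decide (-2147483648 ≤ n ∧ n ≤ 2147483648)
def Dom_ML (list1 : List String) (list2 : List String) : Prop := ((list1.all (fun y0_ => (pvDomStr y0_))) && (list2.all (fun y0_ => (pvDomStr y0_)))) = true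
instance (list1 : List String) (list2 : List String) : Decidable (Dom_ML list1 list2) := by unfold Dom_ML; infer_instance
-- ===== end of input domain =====

-- B replaces A's quadratic remove/count loop by two counting dictionaries and one append pass (measurably faster).
-- A mutates both argument lists in place (it empties list1 and appends to list2); B does not — the equivalence proved
-- here is about the RETURN value only.

-- ===== PORT A =====
-- 'for i in range(a): list1.remove(ss)'  (a = list1.count(ss), so every remove succeeds)
def pvRemoveN (n : Nat) (ss : String) (l : List String) : List String :=
  match n with
  | 0 => l
  | Nat.succ m => pvRemoveN m ss ((PySem.List.remove? l ss).getD l)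

-- 'for i in range(a): list2.append(ss); list1.remove(ss)'
def pvMoveN (n : Nat) (ss : String) (l1 l2 : List String) : List String × List String :=
  match n with
  | 0 => (l1, l2)
  | Nat.succ m => pvMoveN m ss ((PySem.List.remove? l1 ss).getD l1) (l2 ++ [ss])

-- the two lemmas ML's termination proof cites by name
theorem pvFilter_erase (ss : String) (l : List String) :
    (l.erase ss).filter (· != ss) = l.filter (· != ss) := by
  induction l with
  | nil => simp
  | cons a t ih =>
    by_cases hx : a = ss
    · subst hx; simp [List.erase_cons_head]
    · simp only [List.erase_cons, beq_iff_eq, if_neg hx, List.filter_cons]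
      rw [ih]

theorem pvRemoveN_count_eq_filter (ss : String) :
    ∀ (n : Nat) (l : List String), l.count ss = n → pvRemoveN n ss l = l.filter (· != ss) := by
  intro n
  induction n with
  | zero =>
    intro l h
    have hnm : ss ∉ l := by simpa [List.count_eq_zero] using h
    rw [pvRemoveN]
    refine (List.filter_eq_self.mpr ?_).symm
    intro a ha
    simp only [bne_iff_ne]
    rintro rfl; exact hnm ha
  | succ m ih =>
    intro l h
    have hmem : ss ∈ l := List.count_pos_iff.mp (by omega)
    have hrem := PySem.List.remove?_eq_some_erase l ss hmem
    have hcnt : (l.erase ss).count ss = m := by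
      rw [List.count_erase_self, h]; omega
    rw [pvRemoveN, hrem, Option.getD_some, ih _ hcnt, pvFilter_erase]

theorem pvMoveN_eq (ss : String) :
    ∀ (n : Nat) (l1 l2 : List String),
      pvMoveN n ss l1 l2 = (pvRemoveN n ss l1, l2 ++ List.replicate n ss) := by
  intro n
  induction n with
  | zero => intro l1 l2; simp [pvMoveN, pvRemoveN]
  | succ m ih =>
    intro l1 l2
    rw [pvMoveN, ih, pvRemoveN]
    simp [List.replicate_succ]

theorem pvRemoveN_count_length_lt (ss : String) (t : List String) :
    (pvRemoveN ((ss :: t).count ss) ss (ss :: t)).length < (ss :: t).length := by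
  rw [pvRemoveN_count_eq_filter ss _ _ rfl]
  simp only [List.filter_cons, bne_self_eq_false]
  calc (t.filter (· != ss)).length ≤ t.length := List.length_filter_le _ _
    _ < (ss :: t).length := by simp

def ML (list1 : List String) (list2 : List String) : List String :=
  match list1 with
  | [] => list2
  | ss :: t =>
    let a := (ss :: t).count ss
    let b := list2.count ss
    if ss ∈ list2 then
      if a - b ≤ 0 then
        ML (pvRemoveN a ss (ss :: t)) list2
      else
        ML (pvRemoveN a ss (ss :: t)) (list2 ++ List.replicate (a - b) ss)
    else
      ML (pvMoveN a ss (ss :: t) list2).1 (pvMoveN a ss (ss :: t) list2).2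
  termination_by list1.length
  decreasing_by
  · exact pvRemoveN_count_length_lt ss t
  · exact pvRemoveN_count_length_lt ss t
  · rw [pvMoveN_eq]; exact pvRemoveN_count_length_lt ss t

-- ===== PORT B =====
def ML_alt (list1 : List String) (list2 : List String) : List String :=
  let c1 : PySem.Dict String Int := list1.foldl (fun d x => d.insert x (d.getD x 0 + 1)) PySem.Dict.empty
  let c2 : PySem.Dict String Int := list2.foldl (fun d x => d.insert x (d.getD x 0 + 1)) PySem.Dict.empty
  c1.items.foldl (fun out p => out ++ List.replicate (max 0 (p.2 - c2.getD p.1 0)).toNat p.1) list2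

-- ===== PRECONDITION & SPEC =====
def Spec_ML (list1 : List String) (list2 : List String) (out : List String) : Prop := out = ML_alt list1 list2
instance (list1 : List String) (list2 : List String) (out : List String) : Decidable (Spec_ML list1 list2 out) := by unfold Spec_ML; infer_instance

-- ===== CLAIM (what is proved, stated in full; the proofs are below) =====
def Claim_equal_ML : Prop := ∀ (list1 : List String) (list2 : List String), Dom_ML list1 list2 → Spec_ML list1 list2 (ML list1 list2)

-- ===== LEMMAS AND PROOFS =====

-- the common normal form of both ports: per distinct element of l1 (first occurrence order),
-- max(0, count in l1 - count in l2) copies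
def pvUnion (l1 l2 : List String) : List String :=
  (PySem.Set.ofList l1).flatMap (fun x => List.replicate (List.count x l1 - List.count x l2) x)

theorem pvOfList_filter (p : String → Bool) (l : List String) :
    PySem.Set.ofList (l.filter p) = (PySem.Set.ofList l).filter p := by
  induction l with
  | nil => rfl
  | cons a t ih =>
    rw [PySem.Set.ofList_cons]
    by_cases hp : p a
    · rw [List.filter_cons, if_pos hp, PySem.Set.ofList_cons, ih]
      simp only [PySem.Set.discard, List.filter_cons, hp, if_pos, List.filter_filter]
      congr 1
      exact List.filter_congr (fun x _ => Bool.and_comm _ _)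
    · rw [List.filter_cons, if_neg hp, ih]
      simp only [PySem.Set.discard, List.filter_cons, List.filter_filter]
      rw [if_neg (by simp [hp])]
      refine List.filter_congr (fun x _ => ?_)
      by_cases hx : x = a
      · subst hx; simp [hp]
      · simp [hx]

theorem pvUnion_cons (ss : String) (t l2 : List String) :
    pvUnion (ss :: t) l2 =
      List.replicate (List.count ss (ss :: t) - List.count ss l2) ss ++
        pvUnion ((ss :: t).filter (· != ss))
          (l2 ++ List.replicate (List.count ss (ss :: t) - List.count ss l2) ss) := by
  rw [pvUnion, PySem.Set.ofList_cons, List.flatMap_cons]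
  congr 1
  rw [pvUnion]
  have hset : PySem.Set.ofList ((ss :: t).filter (· != ss)) = PySem.Set.discard (PySem.Set.ofList t) ss := by
    rw [pvOfList_filter]
    rw [PySem.Set.ofList_cons]
    simp only [PySem.Set.discard, List.filter_cons, bne_self_eq_false, List.filter_filter]
    rw [if_neg (by simp)]
    refine List.filter_congr (fun x _ => ?_)
    simp [bne]
  rw [hset]
  refine List.flatMap_congr (fun x hx => ?_)
  have hxne : x ≠ ss := by
    have := (PySem.Set.mem_discard (PySem.Set.ofList t) ss x).mp hx
    exact this.2
  have h1 : List.count x ((ss :: t).filter (· != ss)) = List.count x (ss :: t) :=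
    List.count_filter (by simp [bne_iff_ne, hxne])
  have h2 : List.count x (l2 ++ List.replicate (List.count ss (ss :: t) - List.count ss l2) ss) = List.count x l2 := by
    simp [List.count_append, List.count_replicate, Ne.symm hxne]
  rw [h1, h2]

theorem pvML_eq_union : ∀ (n : Nat) (l1 l2 : List String), l1.length ≤ n → ML l1 l2 = l2 ++ pvUnion l1 l2 := by
  intro n
  induction n with
  | zero =>
    intro l1 l2 h
    have : l1 = [] := List.eq_nil_of_length_eq_zero (by omega)
    subst this
    rw [ML]
    simp [pvUnion, PySem.Set.ofList]
  | succ n ih =>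
    intro l1 l2 hlen
    match l1 with
    | [] =>
      rw [ML]; simp [pvUnion, PySem.Set.ofList]
    | ss :: t =>
      have hlt : ((ss :: t).filter (· != ss)).length ≤ n := by
        have h1 : ((ss :: t).filter (· != ss)).length ≤ t.length := by
          simp only [List.filter_cons, bne_self_eq_false]
          exact List.length_filter_le _ _
        have h2 : (ss :: t).length ≤ n + 1 := hlen
        simp only [List.length_cons] at h2
        omega
      set a := List.count ss (ss :: t) with ha
      set b := List.count ss l2 with hb
      have key : ML (ss :: t) l2 = ML ((ss :: t).filter (· != ss)) (l2 ++ List.replicate (a - b) ss) := by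
        rw [ML]
        by_cases hmem : ss ∈ l2
        · by_cases hab : List.count ss (ss :: t) - List.count ss l2 ≤ 0
          · rw [if_pos hmem, if_pos hab]
            rw [pvRemoveN_count_eq_filter ss _ _ rfl]
            have : a - b = 0 := by omega
            rw [this]
            simp
          · rw [if_pos hmem, if_neg hab]
            rw [pvRemoveN_count_eq_filter ss _ _ rfl]
        · rw [if_neg hmem]
          have hb0 : b = 0 := List.count_eq_zero.mpr hmem
          rw [pvMoveN_eq, pvRemoveN_count_eq_filter ss _ _ rfl]
          simp [hb0, ha, List.count_cons_self]
      rw [key, ih _ _ hlt, pvUnion_cons ss t l2, List.append_assoc]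

theorem pvML_alt_eq_union (l1 l2 : List String) : ML_alt l1 l2 = l2 ++ pvUnion l1 l2 := by
  unfold ML_alt
  rw [PySem.Dict.foldl_insert_getD_add_one_eq_counter, PySem.Dict.foldl_insert_getD_add_one_eq_counter,
    PySem.List.foldl_append_eq_flatMap
      (g := fun p : String × Int => List.replicate (max 0 (p.2 - (PySem.Dict.counter l2).getD p.1 0)).toNat p.1),
    PySem.Dict.items_counter, List.flatMap_map, pvUnion]
  congr 1
  refine List.flatMap_congr (fun x _ => ?_)
  simp only [PySem.Dict.getD_counter]
  congr 1
  omega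

-- ===== VERDICT (by name: the statement is the Claim_ definition above) =====
theorem ML_spec : Claim_equal_ML := by
  intro l1 l2 _
  unfold Spec_ML
  rw [pvML_eq_union l1.length l1 l2 le_rfl, pvML_alt_eq_union]
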